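-- pv_equiv track=rewrite | github.com/DavidSimhaev/HomeDavid | day54/home_from_site/remove_all_after.py | remove_all_after
-- ===== SOURCE A (Python) =====
-- def remove_all_after(items: list[int], border: int):
--     res  = []
--     for index in range(len(items)):
--         if items[index] == border:
--             res.append(items[index])
--             break
--         res.append(items[index])
--     return res
-- ===== SOURCE B (Python) =====
-- def remove_all_after(items: list[int], border: int):
--     try:
--         idx = items.index(border)
--     except ValueError:
--         return items[:]
--     return items[:idx + 1]
-- ===== Notes on version B (the rewrite author's own statement) =====
-- stated objective: idiomatic
-- what changed: Replaces the manual index loop that appends elements one at a time with a locate-then-slice decomposition: find the first border via list.index (full copy on ValueError) and return one bulk slice items[:idx+1].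
import Mathlib
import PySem

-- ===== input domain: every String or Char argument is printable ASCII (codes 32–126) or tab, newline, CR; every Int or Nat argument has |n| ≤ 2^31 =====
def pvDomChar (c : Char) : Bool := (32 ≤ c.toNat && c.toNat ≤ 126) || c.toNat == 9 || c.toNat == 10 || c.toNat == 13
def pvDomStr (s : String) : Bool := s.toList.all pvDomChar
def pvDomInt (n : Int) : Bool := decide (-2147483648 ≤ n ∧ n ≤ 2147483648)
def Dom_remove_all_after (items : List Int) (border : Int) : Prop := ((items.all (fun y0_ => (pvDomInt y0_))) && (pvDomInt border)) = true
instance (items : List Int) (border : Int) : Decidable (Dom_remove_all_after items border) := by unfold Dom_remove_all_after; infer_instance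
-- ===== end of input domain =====

-- B replaces A's manual index loop (append one element at a time, break at border)
-- with a locate-then-slice decomposition: list.index + one bulk slice (idiomatic, same cost).

-- ===== PORT A =====
-- A's for-loop over range(len(items)) with a break, carried as recursion over the
-- remaining index list with the accumulator res; the `none` branch of pyGet? is
-- unreachable (indices come from range(len(items))) and merely keeps the port total.
def removeAllAfterLoop (items : List Int) (border : Int) : List Int → List Int → List Int
  | [], res => res
  | i :: rest, res =>
    match PySem.List.pyGet? items i with
    | none => res
    | some v =>
      if v = border then res ++ [v]
      else removeAllAfterLoop items border rest (res ++ [v])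

def remove_all_after (items : List Int) (border : Int) : List Int :=
  removeAllAfterLoop items border (PySem.List.pyRange 0 items.length 1) []

-- ===== PORT B =====
def remove_all_after_alt (items : List Int) (border : Int) : List Int :=
  match PySem.List.index? items border with
  | none => items                                   -- items[:] : a full copy
  | some idx => PySem.List.slice items (some 0) (some ((idx : Int) + 1))   -- items[:idx+1]

-- ===== PRECONDITION & SPEC =====
def Spec_remove_all_after (items : List Int) (border : Int) (out : List Int) : Prop := out = remove_all_after_alt items border
instance (items : List Int) (border : Int) (out : List Int) : Decidable (Spec_remove_all_after items border out) := by unfold Spec_remove_all_after; infer_instance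

-- ===== CLAIM (what is proved, stated in full; the proofs are below) =====
def Claim_equal_remove_all_after : Prop := ∀ (items : List Int) (border : Int), Dom_remove_all_after items border → Spec_remove_all_after items border (remove_all_after items border)

-- ===== LEMMAS AND PROOFS =====

-- reference function: prefix of items up to and including the first border
def cutAt (border : Int) : List Int → List Int
  | [] => []
  | x :: xs => if x = border then [x] else x :: cutAt border xs

theorem removeAllAfterLoop_spec (border : Int) (suf : List Int) :
    ∀ (pre res : List Int),
      removeAllAfterLoop (pre ++ suf) border
        (PySem.List.pyRange (pre.length : Int) ((pre ++ suf).length : Int) 1) res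
      = res ++ cutAt border suf := by
  induction suf with
  | nil =>
    intro pre res
    simp [PySem.List.pyRange, removeAllAfterLoop, cutAt]
  | cons x xs ih =>
    intro pre res
    have hlt : (pre.length : Int) < ((pre ++ x :: xs).length : Int) := by simp
    rw [PySem.List.pyRange_one_cons hlt]
    simp only [removeAllAfterLoop, PySem.List.pyGet?_append_length]
    by_cases hx : x = border
    · simp [hx, cutAt]
    · have hpre : ((pre ++ [x]).length : Int) = (pre.length : Int) + 1 := by simp
      have happ : (pre ++ [x]) ++ xs = pre ++ x :: xs := by simp
      have hrec := ih (pre ++ [x]) (res ++ [x])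
      rw [hpre, happ] at hrec
      simp only [if_neg hx, hrec, cutAt]
      simp

theorem removeA_eq_cut (items : List Int) (border : Int) :
    remove_all_after items border = cutAt border items := by
  have := removeAllAfterLoop_spec border items [] []
  simpa [remove_all_after] using this

theorem slice_zero_succ (xs : List Int) (k : Nat) :
    PySem.List.slice xs (some 0) (some ((k : Int) + 1)) = xs.take (k + 1) := by
  have h : (k : Int) + 1 = ((k + 1 : Nat) : Int) := by push_cast; ring
  rw [h, show (0 : Int) = ((0 : Nat) : Int) from rfl, PySem.List.slice_natCast]
  simp

theorem removeB_eq_cut (items : List Int) (border : Int) :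
    remove_all_after_alt items border = cutAt border items := by
  induction items with
  | nil => simp [remove_all_after_alt, PySem.List.index?_eq_idxOf?, cutAt]
  | cons x xs ih =>
    by_cases hx : x = border
    · subst hx
      rw [remove_all_after_alt, PySem.List.index?_cons_self]
      show PySem.List.slice (x :: xs) (some 0) (some (((0 : Nat) : Int) + 1))
          = cutAt x (x :: xs)
      rw [slice_zero_succ]
      simp [cutAt]
    · rw [remove_all_after_alt, PySem.List.index?_cons_of_ne _ hx]
      cases hidx : PySem.List.index? xs border with
      | none =>
        rw [remove_all_after_alt, hidx] at ih
        simp only [Option.map_none, cutAt, if_neg hx]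
        exact congrArg (x :: ·) ih
      | some k =>
        rw [remove_all_after_alt, hidx] at ih
        have ih2 : PySem.List.slice xs (some 0) (some ((k : Int) + 1))
            = cutAt border xs := ih
        rw [slice_zero_succ] at ih2
        show PySem.List.slice (x :: xs) (some 0) (some (((k + 1 : Nat) : Int) + 1))
            = cutAt border (x :: xs)
        rw [slice_zero_succ]
        simp only [List.take_succ_cons, cutAt, if_neg hx]
        exact congrArg (x :: ·) ih2

-- ===== VERDICT (by name: the statement is the Claim_ definition above) =====
theorem remove_all_after_spec : Claim_equal_remove_all_after := by
  intro items border _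
  unfold Spec_remove_all_after
  rw [removeA_eq_cut, removeB_eq_cut]
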